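-- pv_equiv track=rewrite | github.com/devonjones/PFSRD2-Parser | pfsrd2/equipment.py | _extract_traits_from_parentheses
-- ===== SOURCE A (Python) =====
-- def _extract_traits_from_parentheses(text):
--     """Extract trait names from leading parentheses in ability text.
--
--     Format: "(trait1, trait2, ...) rest of text"
--     Returns: (trait_names_list, remaining_text)
--
--     Example: "(manipulate, attack) deals damage" -> (["manipulate", "attack"], "deals damage")
--
--     Note: Some traits include additional data (e.g., "range increment 100 feet").
--     These are kept as-is and will be looked up in the trait database.
--     """
--     text = text.strip()
--     if text.startswith("("):
--         close_paren = text.find(")")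
--         if close_paren > 0:
--             traits_text = text[1:close_paren].strip()
--             remaining = text[close_paren + 1 :].strip()
--
--             # Split by comma and clean up each trait name
--             trait_names = [t.strip() for t in traits_text.split(",") if t.strip()]
--             return trait_names, remaining
--
--     return [], text
-- ===== SOURCE B (Python) =====
-- def _extract_traits_from_parentheses(text):
--     """Explicit single character scan instead of find()/index slicing."""
--     text = text.strip()
--     if not text.startswith("("):
--         return [], text
--     inner_chars = []
--     tail = text[1:]
--     for i, ch in enumerate(tail):
--         if ch == ")":
--             inner = "".join(inner_chars).strip()
--             traits = [t.strip() for t in inner.split(",") if t.strip()]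
--             return traits, tail[i + 1:].strip()
--         inner_chars.append(ch)
--     return [], text
-- ===== Notes on version B (the rewrite author's own statement) =====
-- stated objective: alternative
-- what changed: Replaces the startswith/find/index-slicing parse with an explicit single left-to-right character scan that accumulates the inner trait text and yields the remainder directly.
import Mathlib
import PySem

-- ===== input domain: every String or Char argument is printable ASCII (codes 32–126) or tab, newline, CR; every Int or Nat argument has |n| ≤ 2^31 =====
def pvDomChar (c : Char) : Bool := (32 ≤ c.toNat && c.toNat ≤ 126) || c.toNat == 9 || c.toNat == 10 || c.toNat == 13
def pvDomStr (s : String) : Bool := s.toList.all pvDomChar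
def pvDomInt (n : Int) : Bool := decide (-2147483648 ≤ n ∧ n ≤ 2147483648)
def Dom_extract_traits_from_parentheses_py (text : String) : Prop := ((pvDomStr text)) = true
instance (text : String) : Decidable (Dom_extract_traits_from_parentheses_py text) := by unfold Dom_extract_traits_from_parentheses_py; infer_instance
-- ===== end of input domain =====

-- B replaces the find()/index-slicing parse with an explicit character scan (objective: alternative).

-- ===== PORT A =====
-- s.split(",") with the non-empty separator "," always succeeds, hence .getD []
def extract_traits_from_parentheses_py (text : String) : List String × String :=
  let text := PySem.Str.strip text
  if PySem.Str.startswith text "(" then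
    let close_paren := PySem.Str.find text ")"
    if close_paren > 0 then
      let traits_text := PySem.Str.strip (PySem.Str.slice text (some 1) (some close_paren))
      let remaining := PySem.Str.strip (PySem.Str.slice text (some (close_paren + 1)) none)
      let trait_names := ((PySem.Str.split? traits_text ",").getD []).filter
          (fun t => PySem.Str.strip t ≠ "") |>.map PySem.Str.strip
      (trait_names, remaining)
    else ([], text)
  else ([], text)

-- ===== PORT B =====
-- the 'for i, ch in enumerate(tail)' loop of Source B as structural recursion: the unconsumed
-- suffix cs IS tail[i+1:], acc is inner_chars; "".join over a list of chars = String.ofList (exact)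
def pvScan (acc : List Char) : List Char → Option (List Char × List Char)
  | [] => none
  | c :: cs => if c = ')' then some (acc, cs) else pvScan (acc ++ [c]) cs

def extract_traits_from_parentheses_py_alt (text : String) : List String × String :=
  let text := PySem.Str.strip text
  if !(PySem.Str.startswith text "(") then ([], text)
  else
    match pvScan [] (PySem.Str.slice text (some 1) none).toList with
    | some (innerChars, restChars) =>
      let inner := PySem.Str.strip (String.ofList innerChars)
      let traits := ((PySem.Str.split? inner ",").getD []).filter
          (fun t => PySem.Str.strip t ≠ "") |>.map PySem.Str.strip
      (traits, PySem.Str.strip (String.ofList restChars))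
    | none => ([], text)

-- ===== PRECONDITION & SPEC =====
def Spec_extract_traits_from_parentheses_py (text : String) (out : List String × String) : Prop := out = extract_traits_from_parentheses_py_alt text
instance (text : String) (out : List String × String) : Decidable (Spec_extract_traits_from_parentheses_py text out) := by unfold Spec_extract_traits_from_parentheses_py; infer_instance

-- ===== CLAIM (what is proved, stated in full; the proofs are below) =====
def Claim_equal_extract_traits_from_parentheses_py : Prop := ∀ (text : String), Dom_extract_traits_from_parentheses_py text → Spec_extract_traits_from_parentheses_py text (extract_traits_from_parentheses_py text)

-- ===== LEMMAS AND PROOFS =====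

lemma pvScan_spec (cs : List Char) (acc : List Char) :
    pvScan acc cs =
      if ')' ∈ cs then
        some (acc ++ cs.takeWhile (fun c => c ≠ ')'), (cs.dropWhile (fun c => c ≠ ')')).tail)
      else none := by
  induction cs generalizing acc with
  | nil => simp [pvScan]
  | cons c cs ih =>
    by_cases hc : c = ')'
    · subst hc; simp [pvScan]
    · have hc' : ¬ (')' = c) := fun h => hc h.symm
      simp [pvScan, hc, hc', ih]

lemma pv_singleton_infix {c : Char} {l : List Char} : [c] <:+: l ↔ c ∈ l := by
  constructor
  · intro h; exact h.mem (by simp)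
  · intro h
    obtain ⟨l₁, l₂, rfl⟩ := List.append_of_mem h
    exact ⟨l₁, l₂, by simp⟩

lemma pv_singleton_prefix_drop {c : Char} {l : List Char} {i : Nat} :
    [c] <+: l.drop i ↔ l[i]? = some c := by
  rw [← List.head?_drop]
  cases h : l.drop i with
  | nil => simp [List.prefix_iff_eq_take]
  | cons x xs => simp [List.cons_prefix_cons, eq_comm]

lemma pv_takeWhile_dropWhile_first (l : List Char) (k : Nat)
    (hk : l[k]? = some ')') (hmin : ∀ i < k, l[i]? ≠ some ')') :
    l.takeWhile (fun c => c ≠ ')') = l.take k ∧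
      l.dropWhile (fun c => c ≠ ')') = l.drop k := by
  induction l generalizing k with
  | nil => simp at hk
  | cons c cs ih =>
    cases k with
    | zero =>
      simp at hk; subst hk
      simp [List.takeWhile, List.dropWhile]
    | succ m =>
      have hc : c ≠ ')' := by
        have := hmin 0 (Nat.succ_pos m); simpa using this
      have hk' : cs[m]? = some ')' := by simpa using hk
      have hmin' : ∀ i < m, cs[i]? ≠ some ')' := by
        intro i hi
        have := hmin (i + 1) (Nat.succ_lt_succ hi)
        simpa using this
      obtain ⟨h1, h2⟩ := ih m hk' hmin'
      simp only [ne_eq, decide_not] at h1 h2 ⊢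
      simp [hc, h1, h2]

set_option maxHeartbeats 1000000 in
theorem pv_main (text : String) :
    extract_traits_from_parentheses_py text = extract_traits_from_parentheses_py_alt text := by
  unfold extract_traits_from_parentheses_py extract_traits_from_parentheses_py_alt
  set s := PySem.Str.strip text with hs
  by_cases hsw : PySem.Str.startswith s "(" = true
  · -- s starts with '('
    have hpre : ['('] <+: s.toList := by
      have := (PySem.Chars.startswith_iff s.toList "(".toList).mp (by simpa using hsw)
      simpa using this
    obtain ⟨r, hr⟩ : ∃ r, s.toList = '(' :: r := by
      rcases hpre with ⟨t, ht⟩; exact ⟨t, ht.symm⟩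
    have htail : (PySem.Str.slice s (some 1) none).toList = r := by
      simp [PySem.Str.toList_slice, PySem.List.slice_from_one, hr]
    by_cases hmem : ')' ∈ s.toList
    · -- a closing paren exists
      have hnn : 0 ≤ PySem.Chars.find s.toList [')'] :=
        (PySem.Chars.find_nonneg_iff _ _).mpr (pv_singleton_infix.mpr hmem)
      obtain ⟨k, hke⟩ : ∃ k : Nat, PySem.Chars.find s.toList [')'] = (k : Int) :=
        ⟨_, (Int.toNat_of_nonneg hnn).symm⟩
      have hkt : (PySem.Chars.find s.toList [')']).toNat = k := by rw [hke]; simp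
      obtain ⟨hfnd, hmin0⟩ := PySem.Chars.find_spec hnn
      rw [hkt] at hfnd hmin0
      have hk : s.toList[k]? = some ')' := pv_singleton_prefix_drop.mp hfnd
      have hmin : ∀ i < k, s.toList[i]? ≠ some ')' := fun i hi h =>
        hmin0 i hi (pv_singleton_prefix_drop.mpr h)
      have hk1 : 1 ≤ k := by
        rcases Nat.eq_zero_or_pos k with h0 | h
        · rw [h0, hr] at hk; simp at hk
        · exact h
      have hkk : k = (k - 1) + 1 := by omega
      have hfeq : PySem.Str.find s ")" = (k : Int) := by
        rw [PySem.Str.find_eq]; exact hke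
      obtain ⟨htw, hdw⟩ := pv_takeWhile_dropWhile_first s.toList k hk hmin
      have hne : ('(' : Char) ≠ ')' := by decide
      -- components on r
      have htwr : r.takeWhile (fun c => c ≠ ')') = r.take (k - 1) := by
        rw [hr, List.takeWhile_cons_of_pos (by simp), hkk,
          List.take_succ_cons] at htw
        exact (List.cons.injEq _ _ _ _ ▸ htw).2
      have hdwr : (r.dropWhile (fun c => c ≠ ')')).tail = r.drop k := by
        rw [hr, List.dropWhile_cons_of_pos (by simp)] at hdw
        rw [hkk, List.drop_succ_cons] at hdw
        rw [hdw, List.tail_drop, ← hkk]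
      have escan : pvScan [] (PySem.Str.slice s (some 1) none).toList
          = some (r.take (k - 1), r.drop k) := by
        rw [htail, pvScan_spec]
        have hmr : ')' ∈ r := by
          rw [hr] at hmem
          rcases List.mem_cons.mp hmem with h | h
          · exact absurd h.symm hne
          · exact h
        simp only [hmr, if_true]
        rw [List.nil_append, htwr, hdwr]
      -- A's slices as lists
      have e1 : PySem.Str.slice s (some 1) (some (PySem.Str.find s ")"))
          = String.ofList (r.take (k - 1)) := by
        have h : (PySem.Str.slice s (some 1) (some (PySem.Str.find s ")"))).toList
            = r.take (k - 1) := by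
          rw [PySem.Str.toList_slice, hfeq, PySem.Chars.slice_eq_listSlice,
            PySem.List.slice_toNat s.toList (by norm_num) (by exact_mod_cast Nat.zero_le k)]
          simp [hr]
        rw [← h, String.ofList_toList]
      have e2 : PySem.Str.slice s (some (PySem.Str.find s ")" + 1)) none
          = String.ofList (r.drop k) := by
        have h : (PySem.Str.slice s (some (PySem.Str.find s ")" + 1)) none).toList
            = r.drop k := by
          rw [PySem.Str.toList_slice, hfeq, PySem.Chars.slice_eq_listSlice,
            PySem.List.slice_from s.toList (by exact_mod_cast Nat.zero_le (k + 1))]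
          have h2 : ((k : Int) + 1).toNat = k + 1 := by omega
          rw [h2, hr]; simp
        rw [← h, String.ofList_toList]
      have hgt : PySem.Str.find s ")" > 0 := by
        rw [hfeq]; exact_mod_cast hk1
      simp only [hsw, if_true, Bool.not_true, Bool.false_eq_true, if_false, escan,
        if_pos hgt, e1, e2]
    · -- no closing paren
      have hfneg : PySem.Chars.find s.toList [')'] = -1 :=
        (PySem.Chars.find_eq_neg_one_iff _ _).mpr
          (fun h => hmem (pv_singleton_infix.mp (by simpa using h)))
      have escan : pvScan [] (PySem.Str.slice s (some 1) none).toList = none := by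
        rw [htail, pvScan_spec]
        have h : ')' ∉ r := fun h => hmem (by rw [hr]; simp [h])
        simp [h]
      have escanL : pvScan [] (PySem.List.slice s.toList (some 1) none) = none := by
        simpa using escan
      have hswL : PySem.Chars.startswith s.toList ['('] = true := by simpa using hsw
      simp [hswL, hfneg, escanL]
  · have hf : PySem.Chars.startswith s.toList ['('] = false := by
      have : PySem.Str.startswith s "(" = false := by simpa using hsw
      simpa using this
    simp [hf]

-- ===== VERDICT (by name: the statement is the Claim_ definition above) =====
theorem extract_traits_from_parentheses_py_spec : Claim_equal_extract_traits_from_parentheses_py := by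
  intro text _
  exact pv_main text
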